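-- pv_equiv track=rewrite | github.com/dondon17/algorithm | samsung sw/level3/calkinWifiTree.py | solution
-- ===== SOURCE A (Python) =====
-- def solution(direction):
--     a, b = 1, 1
--     for d in direction:
--         if d=='L':
--             b = a+b
--         elif d == 'R':
--             a = a+b
--     return a, b
-- ===== SOURCE B (Python) =====
-- def solution(direction):
--     s = [c for c in direction if c in ('L', 'R')]
--     a, b = 1, 1
--     while s:
--         c = s[0]
--         k = 1
--         while k < len(s) and s[k] == c:
--             k += 1
--         if c == 'L':
--             b += k * a
--         else:
--             a += k * b
--         s = s[k:]
--     return a, b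
-- ===== Notes on version B (the rewrite author's own statement) =====
-- stated objective: alternative
-- what changed: B first filters to the L/R characters, then scans maximal runs of equal characters and applies each run as a single multiply-add (b += k*a or a += k*b), instead of A's one-addition-per-character loop.
import Mathlib
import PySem

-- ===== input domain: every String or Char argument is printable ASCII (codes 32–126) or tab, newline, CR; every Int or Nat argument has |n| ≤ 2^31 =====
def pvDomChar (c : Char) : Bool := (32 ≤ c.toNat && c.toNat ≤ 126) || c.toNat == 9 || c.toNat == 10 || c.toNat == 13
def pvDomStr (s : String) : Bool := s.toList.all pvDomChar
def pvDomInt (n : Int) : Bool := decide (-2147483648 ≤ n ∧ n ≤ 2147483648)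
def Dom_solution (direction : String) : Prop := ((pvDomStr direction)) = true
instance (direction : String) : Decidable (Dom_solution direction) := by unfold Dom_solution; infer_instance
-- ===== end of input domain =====

-- B groups the L/R characters into maximal runs and applies each run as one multiply-add,
-- instead of A's one-addition-per-character loop; objective: alternative decomposition.

-- ===== PORT A =====
-- per-character step of A's loop: 'L' updates b, 'R' updates a, anything else is skipped
def stepA (p : Int × Int) (d : Char) : Int × Int :=
  if d = 'L' then (p.1, p.1 + p.2)
  else if d = 'R' then (p.1 + p.2, p.2)
  else p

def solution (direction : String) : Int × Int :=
  direction.toList.foldl stepA (1, 1)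

-- ===== PORT B =====
-- run loop of Source B: c = s[0]; k = length of the maximal run of c; batched update; s = s[k:]
def runLoop : List Char → Int → Int → Int × Int
  | [], a, b => (a, b)
  | c :: rest, a, b =>
    let k : Int := (rest.takeWhile (· == c)).length + 1
    let rest' := rest.dropWhile (· == c)
    if c = 'L' then runLoop rest' a (b + k * a)
    else runLoop rest' (a + k * b) b
termination_by s => s.length
decreasing_by
  all_goals
    simp only [List.length_cons]
    exact Nat.lt_succ_of_le (List.length_dropWhile_le _ _)

def solution_alt (direction : String) : Int × Int :=
  runLoop (direction.toList.filter (fun c => c = 'L' ∨ c = 'R')) 1 1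

-- ===== PRECONDITION & SPEC =====
def Spec_solution (direction : String) (out : Int × Int) : Prop := out = solution_alt direction
instance (direction : String) (out : Int × Int) : Decidable (Spec_solution direction out) := by unfold Spec_solution; infer_instance

-- ===== CLAIM (what is proved, stated in full; the proofs are below) =====
def Claim_equal_solution : Prop := ∀ (direction : String), Dom_solution direction → Spec_solution direction (solution direction)

-- ===== LEMMAS AND PROOFS =====

-- A's step ignores characters other than 'L'/'R'
theorem foldl_stepA_filter (l : List Char) (st : Int × Int) :
    l.foldl stepA st = (l.filter (fun c => c = 'L' ∨ c = 'R')).foldl stepA st := by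
  induction l generalizing st with
  | nil => rfl
  | cons c rest ih =>
    by_cases hL : c = 'L'
    · simp [List.filter, hL, List.foldl, ih]
    · by_cases hR : c = 'R'
      · simp [List.filter, hR, List.foldl, ih]
      · simp [List.filter, hL, hR, List.foldl, ih, stepA]

-- a run of k copies of 'L' adds k*a to b
theorem foldl_stepA_L (t : List Char) (a b : Int) (h : ∀ x ∈ t, x = 'L') :
    t.foldl stepA (a, b) = (a, b + (t.length : Int) * a) := by
  induction t generalizing b with
  | nil => simp
  | cons c rest ih =>
    have hc : c = 'L' := h c (List.mem_cons_self ..)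
    have hrest : ∀ x ∈ rest, x = 'L' := fun x hx => h x (List.mem_cons_of_mem _ hx)
    have hstep : stepA (a, b) c = (a, a + b) := by simp [stepA, hc]
    rw [List.foldl_cons, hstep, ih _ hrest, Prod.mk.injEq]
    refine ⟨rfl, ?_⟩
    simp only [List.length_cons]; push_cast; ring

-- a run of k copies of 'R' adds k*b to a
theorem foldl_stepA_R (t : List Char) (a b : Int) (h : ∀ x ∈ t, x = 'R') :
    t.foldl stepA (a, b) = (a + (t.length : Int) * b, b) := by
  induction t generalizing a with
  | nil => simp
  | cons c rest ih =>
    have hc : c = 'R' := h c (List.mem_cons_self ..)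
    have hrest : ∀ x ∈ rest, x = 'R' := fun x hx => h x (List.mem_cons_of_mem _ hx)
    have hstep : stepA (a, b) c = (a + b, b) := by simp [stepA, hc]
    rw [List.foldl_cons, hstep, ih _ hrest, Prod.mk.injEq]
    refine ⟨?_, rfl⟩
    simp only [List.length_cons]; push_cast; ring

-- on a list of L/R characters, the per-character fold equals the run-batched loop
theorem foldl_stepA_eq_runLoop (s : List Char) (a b : Int)
    (hs : ∀ x ∈ s, x = 'L' ∨ x = 'R') :
    s.foldl stepA (a, b) = runLoop s a b := by
  induction hn : s.length using Nat.strong_induction_on generalizing s a b with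
  | _ n ih =>
    match s, hs with
    | [], _ => simp [runLoop]
    | c :: rest, hs =>
      have hsplit : rest.takeWhile (· == c) ++ rest.dropWhile (· == c) = rest :=
        List.takeWhile_append_dropWhile
      have htake : ∀ x ∈ rest.takeWhile (· == c), x = c := by
        intro x hx
        have := List.mem_takeWhile_imp hx
        simpa using this
      have hdrop : ∀ x ∈ rest.dropWhile (· == c), x = 'L' ∨ x = 'R' := by
        intro x hx
        exact hs x (List.mem_cons_of_mem _ ((hsplit ▸ List.mem_append_right _ hx)))
      have hlen : (rest.dropWhile (· == c)).length < n := by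
        subst hn
        simp only [List.length_cons]
        exact Nat.lt_succ_of_le (List.length_dropWhile_le _ _)
      have hfold : (c :: rest).foldl stepA (a, b) =
          (rest.dropWhile (· == c)).foldl stepA ((c :: rest.takeWhile (· == c)).foldl stepA (a, b)) := by
        conv_lhs => rw [show (c :: rest) = (c :: rest.takeWhile (· == c)) ++ rest.dropWhile (· == c) by
          simp [hsplit]]
        rw [List.foldl_append]
      have hcLR := hs c (List.mem_cons_self ..)
      rcases hcLR with hc | hc
      · subst hc
        have hallL : ∀ x ∈ ('L' :: rest.takeWhile (· == 'L')), x = 'L' := by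
          intro x hx
          rcases List.mem_cons.mp hx with h | h
          · exact h
          · exact htake x h
        rw [hfold, foldl_stepA_L _ a b hallL, runLoop]
        simp only [if_true]
        rw [ih _ hlen _ _ _ hdrop rfl]
        congr 1
      · subst hc
        have hallR : ∀ x ∈ ('R' :: rest.takeWhile (· == 'R')), x = 'R' := by
          intro x hx
          rcases List.mem_cons.mp hx with h | h
          · exact h
          · exact htake x h
        rw [hfold, foldl_stepA_R _ a b hallR, runLoop]
        rw [if_neg (by decide)]
        rw [ih _ hlen _ _ _ hdrop rfl]
        congr 1

-- ===== VERDICT (by name: the statement is the Claim_ definition above) =====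
theorem solution_spec : Claim_equal_solution := by
  intro direction _
  unfold Spec_solution solution solution_alt
  rw [foldl_stepA_filter]
  exact foldl_stepA_eq_runLoop _ 1 1 (fun x hx => by
    have := List.of_mem_filter hx
    simpa using this)
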